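-- pv_equiv track=rewrite | github.com/carlogilmar/the-rabbit-notes | dojo/SICP/29_ordered_sets.py | adjoin_set
-- ===== SOURCE A (Python) =====
-- def adjoin_set(element, set):
--     if not set:
--         return [element]
--     elif set[0] > element:
--         return [element] + set
--     elif set[0] == element:
--         return set
--     else:
--         return [set[0]] + adjoin_set(element, set[1:])
-- ===== SOURCE B (Python) =====
-- def adjoin_set(element, set):
--     result = []
--     for i in range(len(set)):
--         if set[i] > element:
--             return result + [element] + list(set[i:])
--         if set[i] == element:
--             return result + list(set[i:])
--         result.append(set[i])
--     return result + [element]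
-- ===== Notes on version B (the rewrite author's own statement) =====
-- stated objective: faster
-- what changed: Replaced A's recursion (which rebuilds the list with repeated list concatenation and slicing at every level) by a single iterative pass with an accumulator that stops and splices once, avoiding O(n) stack frames and O(n^2) copying.
import Mathlib
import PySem

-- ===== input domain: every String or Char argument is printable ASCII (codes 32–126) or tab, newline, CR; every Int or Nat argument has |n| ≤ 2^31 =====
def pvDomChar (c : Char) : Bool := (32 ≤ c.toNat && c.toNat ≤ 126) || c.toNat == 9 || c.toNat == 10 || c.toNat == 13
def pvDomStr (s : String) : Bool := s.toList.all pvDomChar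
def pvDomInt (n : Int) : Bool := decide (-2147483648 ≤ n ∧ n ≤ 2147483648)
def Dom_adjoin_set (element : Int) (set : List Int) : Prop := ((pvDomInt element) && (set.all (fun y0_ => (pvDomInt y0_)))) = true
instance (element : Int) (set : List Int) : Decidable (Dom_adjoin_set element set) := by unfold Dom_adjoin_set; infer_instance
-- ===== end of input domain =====

-- B replaces A's recursive rebuild with a single iterative accumulator pass (faster).


-- ===== PORT A =====
-- Literal transliteration of A's recursion.
def adjoin_set (element : Int) (set : List Int) : List Int :=
  match set with
  | [] => [element]
  | x :: rest =>
    if x > element then [element] ++ (x :: rest)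
    else if x == element then x :: rest
    else [x] ++ adjoin_set element rest

-- ===== PORT B =====
-- B: iterative single pass with an accumulator; stops and splices once.
def adjoin_set_alt_go (element : Int) (result : List Int) (rest : List Int) : List Int :=
  match rest with
  | [] => result ++ [element]
  | x :: r =>
    if x > element then result ++ [element] ++ (x :: r)
    else if x == element then result ++ (x :: r)
    else adjoin_set_alt_go element (result ++ [x]) r

def adjoin_set_alt (element : Int) (set : List Int) : List Int :=
  adjoin_set_alt_go element [] set

-- ===== PRECONDITION & SPEC =====
def Spec_adjoin_set (element : Int) (set : List Int) (out : List Int) : Prop := out = adjoin_set_alt element set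
instance (element : Int) (set : List Int) (out : List Int) : Decidable (Spec_adjoin_set element set out) := by unfold Spec_adjoin_set; infer_instance

-- ===== CLAIM (what is proved, stated in full; the proofs are below) =====
def Claim_equal_adjoin_set : Prop := ∀ (element : Int) (set : List Int), Dom_adjoin_set element set → Spec_adjoin_set element set (adjoin_set element set)

-- ===== LEMMAS AND PROOFS =====

-- ===== VERDICT (by name: the statement is the Claim_ definition above) =====
theorem alt_go_eq (element : Int) (rest : List Int) :
    ∀ result : List Int, adjoin_set_alt_go element result rest = result ++ adjoin_set element rest := by
  induction rest with
  | nil => intro result; simp [adjoin_set_alt_go, adjoin_set]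
  | cons x r ih =>
    intro result
    simp only [adjoin_set_alt_go, adjoin_set]
    split_ifs <;> simp [ih]

theorem adjoin_set_spec : Claim_equal_adjoin_set := by
  intro element set _
  unfold Spec_adjoin_set adjoin_set_alt
  simp [alt_go_eq]
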